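-- pv_equiv track=rewrite | github.com/flaxos/Gate_rail | src/gaterail/facilities.py | _blocked_components_by_node
-- ===== SOURCE A (Python) =====
-- def _blocked_components_by_node(entries: list[dict[str, object]]) -> dict[str, list[str]]:
--     """Build the legacy node→component blocked aggregate from structured entries."""
--
--     blocked: dict[str, list[str]] = {}
--     for entry in entries:
--         node_id = str(entry.get("node", ""))
--         component_id = str(entry.get("component", ""))
--         if not node_id or not component_id:
--             continue
--         components = blocked.setdefault(node_id, [])
--         if component_id not in components:
--             components.append(component_id)
--     return {node_id: sorted(components) for node_id, components in sorted(blocked.items())}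
-- ===== SOURCE B (Python) =====
-- def _blocked_components_by_node(entries):
--     """Flatten to (node, component) pairs, sort once, then collapse runs."""
--     pairs = []
--     for entry in entries:
--         node_id = str(entry.get("node", ""))
--         component_id = str(entry.get("component", ""))
--         if node_id and component_id:
--             pairs.append((node_id, component_id))
--     pairs.sort()
--     result = {}
--     prev = None
--     for pair in pairs:
--         if pair != prev:
--             result.setdefault(pair[0], []).append(pair[1])
--             prev = pair
--     return result
-- ===== Notes on version B (the rewrite author's own statement) =====
-- stated objective: alternative
-- what changed: Instead of building a dict of dedup-by-membership lists and sorting every key and every list at the end, B flattens entries into (node, component) pairs, sorts that list once, and builds the already-key-sorted result in one pass by collapsing adjacent duplicate pairs, so no per-element membership scan and no final sorting is needed.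
import Mathlib
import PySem

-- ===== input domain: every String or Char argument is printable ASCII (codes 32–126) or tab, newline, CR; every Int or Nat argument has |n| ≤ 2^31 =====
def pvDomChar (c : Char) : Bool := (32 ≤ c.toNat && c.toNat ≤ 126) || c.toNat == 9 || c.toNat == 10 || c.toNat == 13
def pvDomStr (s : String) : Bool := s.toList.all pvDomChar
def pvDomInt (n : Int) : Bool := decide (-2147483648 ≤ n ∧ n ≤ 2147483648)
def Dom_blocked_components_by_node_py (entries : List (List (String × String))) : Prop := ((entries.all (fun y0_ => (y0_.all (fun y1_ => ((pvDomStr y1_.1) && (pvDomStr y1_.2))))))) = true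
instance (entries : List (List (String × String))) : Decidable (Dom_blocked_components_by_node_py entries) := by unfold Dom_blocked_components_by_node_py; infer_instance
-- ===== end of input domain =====

-- B flattens entries into (node, component) pairs, sorts them once and builds the
-- already-key-sorted result in one pass by collapsing adjacent duplicate pairs
-- (objective: alternative decomposition; A's per-element membership scans and final sorts disappear).

-- shared input-convention helper: entry.get(k, "") on the assoc-list encoding of the dict
-- (first match; str() on a str is the identity)
def pyGetStrD (e : List (String × String)) (k : String) : String :=
  match e.find? (fun p => p.1 == k) with
  | some p => p.2
  | none => ""

-- ===== PORT A =====
def blocked_components_by_node_py (entries : List (List (String × String))) : List (String × List String) :=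
  let blocked : PySem.Dict String (List String) :=
    entries.foldl (fun blocked entry =>
      let node_id := pyGetStrD entry "node"
      let component_id := pyGetStrD entry "component"
      if node_id = "" ∨ component_id = "" then blocked
      else
        let d := blocked.setdefault node_id []
        let components := d.getD node_id []
        if component_id ∈ components then d
        else d.insert node_id (components ++ [component_id])) PySem.Dict.empty
  (PySem.List.sorted2 blocked.items (fun p => p.1) (fun p => p.2)).map
    (fun p => (p.1, PySem.List.sorted p.2 (fun c => c)))

-- ===== PORT B =====
def blocked_components_by_node_py_alt (entries : List (List (String × String))) : List (String × List String) :=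
  let pairs : List (String × String) :=
    entries.foldl (fun acc entry =>
      let node_id := pyGetStrD entry "node"
      let component_id := pyGetStrD entry "component"
      if node_id ≠ "" ∧ component_id ≠ "" then acc ++ [(node_id, component_id)] else acc) []
  let sp := PySem.List.sorted2 pairs (fun p => p.1) (fun p => p.2)
  let res := sp.foldl
    (fun (st : PySem.Dict String (List String) × Option (String × String)) pair =>
      if st.2 = some pair then st
      else (st.1.modify pair.1 [] (fun v => v ++ [pair.2]), some pair))
    (PySem.Dict.empty, none)
  res.1.items

-- ===== PRECONDITION & SPEC =====
def Spec_blocked_components_by_node_py (entries : List (List (String × String))) (out : List (String × List String)) : Prop := out = blocked_components_by_node_py_alt entries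
instance (entries : List (List (String × String))) (out : List (String × List String)) : Decidable (Spec_blocked_components_by_node_py entries out) := by unfold Spec_blocked_components_by_node_py; infer_instance

-- ===== CLAIM (what is proved, stated in full; the proofs are below) =====
def Claim_equal_blocked_components_by_node_py : Prop := ∀ (entries : List (List (String × String))), Dom_blocked_components_by_node_py entries → Spec_blocked_components_by_node_py entries (blocked_components_by_node_py entries)

-- ===== LEMMAS AND PROOFS =====

-- the common flattened pair list both programs reduce to
def pvPairs (entries : List (List (String × String))) : List (String × String) :=
  (entries.filter (fun e => decide (pyGetStrD e "node" ≠ "" ∧ pyGetStrD e "component" ≠ ""))).map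
    (fun e => (pyGetStrD e "node", pyGetStrD e "component"))

-- A's per-pair dict update
def pvStepA (d : PySem.Dict String (List String)) (p : String × String) : PySem.Dict String (List String) :=
  let d' := d.setdefault p.1 []
  let components := d'.getD p.1 []
  if p.2 ∈ components then d' else d'.insert p.1 (components ++ [p.2])

-- B's collapse of adjacent duplicates
def pvDst (pv : Option (String × String)) : List (String × String) → List (String × String)
  | [] => []
  | p :: t => if pv = some p then pvDst pv t else p :: pvDst (some p) t

def pvLexLe (p q : String × String) : Prop := p.1 < q.1 ∨ (p.1 = q.1 ∧ p.2 ≤ q.2)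
def pvLexLt (p q : String × String) : Prop := p.1 < q.1 ∨ (p.1 = q.1 ∧ p.2 < q.2)
def pvBefore (a b : String × String) : Bool :=
  decide (a.1 < b.1) || (!decide (b.1 < a.1) && decide (a.2 < b.2))
def pvPvLe (pv : Option (String × String)) (z : String × String) : Prop :=
  ∀ y, pv = some y → pvLexLe y z

-- canonical form both sides reach
def pvCanon (P : List (String × String)) : List (String × List String) :=
  (PySem.List.sorted (PySem.Set.ofList (P.map (fun p => p.1))) (fun n => n)).map
    (fun n => (n, PySem.List.sorted
      (PySem.Set.ofList ((P.filter (fun p => p.1 == n)).map (fun p => p.2))) (fun c => c)))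

theorem pvBefore_true_iff (a b : String × String) : pvBefore a b = true ↔ pvLexLt a b := by
  unfold pvBefore pvLexLt
  simp only [Bool.or_eq_true, Bool.and_eq_true, Bool.not_eq_true', decide_eq_true_eq,
    decide_eq_false_iff_not]
  constructor
  · rintro (h | ⟨h1, h2⟩)
    · exact Or.inl h
    · rcases lt_or_eq_of_le (not_lt.mp h1) with h | h
      · exact Or.inl h
      · exact Or.inr ⟨h, h2⟩
  · rintro (h | ⟨h1, h2⟩)
    · exact Or.inl h
    · exact Or.inr ⟨by rw [h1]; exact lt_irrefl _, h2⟩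
theorem pvNot_lt_iff (a b : String × String) : ¬ pvLexLt a b ↔ pvLexLe b a := by
  unfold pvLexLt pvLexLe
  constructor
  · intro hc
    push Not at hc
    obtain ⟨h1, h2⟩ := hc
    rcases lt_or_eq_of_le (not_lt.mp h1) with h | h
    · exact Or.inl h
    · exact Or.inr ⟨h, not_lt.mp (h2 h.symm)⟩
  · intro hle hlt
    rcases hle with h | ⟨h1, h2⟩ <;> rcases hlt with h' | ⟨h1', h2'⟩
    · exact absurd h (lt_asymm h')
    · exact absurd h (by rw [h1']; exact lt_irrefl _)
    · exact absurd h' (by rw [h1]; exact lt_irrefl _)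
    · exact absurd h2' (not_lt.mpr h2)
theorem pvBefore_false_iff (a b : String × String) : pvBefore a b = false ↔ pvLexLe b a := by
  rw [Bool.eq_false_iff, Ne, pvBefore_true_iff, pvNot_lt_iff]
theorem pvLexLe_of_lt {p q : String × String} (h : pvLexLt p q) : pvLexLe p q := by
  unfold pvLexLt at h; unfold pvLexLe
  rcases h with h | ⟨h1, h2⟩
  · exact Or.inl h
  · exact Or.inr ⟨h1, le_of_lt h2⟩
theorem pvLexLt_trans {p q r : String × String} (h : pvLexLt p q) (h' : pvLexLt q r) : pvLexLt p r := by
  unfold pvLexLt at *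
  rcases h with h | ⟨h1, h2⟩ <;> rcases h' with h' | ⟨h1', h2'⟩
  · exact Or.inl (lt_trans h h')
  · exact Or.inl (h1' ▸ h)
  · exact Or.inl (h1 ▸ h')
  · exact Or.inr ⟨h1.trans h1', lt_trans h2 h2'⟩
theorem pvInsertBy_congr {α : Type} (b₁ b₂ : α → α → Bool) (x : α) (ys : List α)
    (h : ∀ y ∈ ys, b₁ x y = b₂ x y) :
    PySem.List.insertBy b₁ x ys = PySem.List.insertBy b₂ x ys := by
  induction ys with
  | nil => rfl
  | cons y t ih =>
    simp only [PySem.List.insertBy]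
    rw [h y (by simp)]
    split
    · rfl
    · rw [ih (fun z hz => h z (by simp [hz]))]
theorem pvFoldl_insertBy_congr {α : Type} (S : α → Prop) (b₁ b₂ : α → α → Bool)
    (hb : ∀ a b, S a → S b → b₁ a b = b₂ a b) :
    ∀ (xs acc : List α), (∀ x ∈ xs, S x) → (∀ y ∈ acc, S y) →
      xs.foldl (fun a x => PySem.List.insertBy b₁ x a) acc
        = xs.foldl (fun a x => PySem.List.insertBy b₂ x a) acc := by
  intro xs
  induction xs with
  | nil => intro acc _ _; rfl
  | cons x t ih =>
    intro acc hxs hacc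
    have hx : S x := hxs x (by simp)
    simp only [List.foldl_cons]
    rw [pvInsertBy_congr b₁ b₂ x acc (fun y hy => hb x y hx (hacc y hy))]
    exact ih _ (fun z hz => hxs z (by simp [hz]))
      (fun y hy => by
        rcases (PySem.List.mem_insertBy b₂ x y acc).mp hy with h | h
        · exact h ▸ hx
        · exact hacc y h)
theorem pvPairwise_insertBy {α : Type} (b : α → α → Bool)
    (asym : ∀ x y, b x y = true → b y x = false)
    (trans : ∀ x y z, b x y = true → b y z = true → b x z = true)
    (x : α) (ys : List α) (h : ys.Pairwise (fun a c => b c a = false)) :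
    (PySem.List.insertBy b x ys).Pairwise (fun a c => b c a = false) := by
  induction ys with
  | nil => simp [PySem.List.insertBy]
  | cons y t ih =>
    rcases List.pairwise_cons.mp h with ⟨hy, ht⟩
    simp only [PySem.List.insertBy]
    split
    · rename_i hxy
      refine List.pairwise_cons.mpr ⟨?_, h⟩
      intro z hz
      rcases List.mem_cons.mp hz with rfl | hz
      · exact asym x z hxy
      · -- b z x = false: if b z x then b z y (trans with hxy) contradicting hy z
        cases hbzx : b z x with
        | false => rfl
        | true => exact absurd (trans z x y hbzx hxy) (by rw [hy z hz]; simp)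
    · refine List.pairwise_cons.mpr ⟨?_, ih ht⟩
      intro z hz
      rcases (PySem.List.mem_insertBy b x z t).mp hz with rfl | hz
      · rename_i hxy; exact Bool.not_eq_true _ ▸ (by simpa using hxy)
      · exact hy z hz
theorem pvPairwise_foldl_insertBy {α : Type} (b : α → α → Bool)
    (asym : ∀ x y, b x y = true → b y x = false)
    (trans : ∀ x y z, b x y = true → b y z = true → b x z = true)
    (xs : List α) : ∀ acc : List α, acc.Pairwise (fun a c => b c a = false) →
    (xs.foldl (fun a x => PySem.List.insertBy b x a) acc).Pairwise (fun a c => b c a = false) := by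
  induction xs with
  | nil => intro acc h; exact h
  | cons x t ih =>
    intro acc h
    exact ih _ (pvPairwise_insertBy b asym trans x acc h)
theorem pvSorted2_pairs_eq_foldl (xs : List (String × String)) :
    PySem.List.sorted2 xs (fun p => p.1) (fun p => p.2)
      = xs.foldl (fun acc x => PySem.List.insertBy pvBefore x acc) [] := rfl
theorem pvSP_pairwise (xs : List (String × String)) :
    (PySem.List.sorted2 xs (fun p => p.1) (fun p => p.2)).Pairwise pvLexLe := by
  rw [pvSorted2_pairs_eq_foldl]
  have h := pvPairwise_foldl_insertBy pvBefore
    (fun x y hx => (pvBefore_false_iff y x).mpr (pvLexLe_of_lt ((pvBefore_true_iff x y).mp hx)))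
    (fun x y z hxy hyz => (pvBefore_true_iff x z).mpr
      (pvLexLt_trans ((pvBefore_true_iff x y).mp hxy) ((pvBefore_true_iff y z).mp hyz)))
    xs [] (by simp)
  exact h.imp (fun hab => (pvBefore_false_iff _ _).mp hab)
theorem pvLexLe_antisymm {p q : String × String} (h : pvLexLe p q) (h' : pvLexLe q p) : p = q := by
  rcases h with h | ⟨h1, h2⟩ <;> rcases h' with h' | ⟨h1', h2'⟩
  · exact absurd h' (lt_asymm h)
  · exact absurd h (by rw [h1']; exact lt_irrefl _)
  · exact absurd h' (by rw [h1]; exact lt_irrefl _)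
  · exact Prod.ext h1 (le_antisymm h2 h2')
theorem pvLexLt_of_le_ne {p q : String × String} (h : pvLexLe p q) (hne : q ≠ p) : pvLexLt p q := by
  rcases h with h | ⟨h1, h2⟩
  · exact Or.inl h
  · refine Or.inr ⟨h1, lt_of_le_of_ne h2 ?_⟩
    intro h2e; exact hne (Prod.ext h1.symm h2e.symm)
theorem pvFoldl_add_sublist {α : Type} [BEq α] (xs : List α) :
    ∀ acc : List α, ∃ ys, ys.Sublist xs ∧ List.foldl PySem.Set.add acc xs = acc ++ ys := by
  induction xs with
  | nil => intro acc; exact ⟨[], List.Sublist.refl _, by simp⟩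
  | cons x t ih =>
    intro acc
    simp only [List.foldl_cons]
    rw [PySem.Set.add]
    by_cases hc : PySem.Set.contains acc x = true
    · rw [if_pos hc]
      obtain ⟨ys, hs, he⟩ := ih acc
      exact ⟨ys, hs.cons _, he⟩
    · rw [if_neg hc]
      obtain ⟨ys, hs, he⟩ := ih (acc ++ [x])
      exact ⟨x :: ys, hs.cons₂ _, by rw [he, List.append_assoc]; rfl⟩
theorem pvOfList_sublist {α : Type} [BEq α] (xs : List α) :
    (PySem.Set.ofList xs).Sublist xs := by
  obtain ⟨ys, hs, he⟩ := pvFoldl_add_sublist xs []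
  have : PySem.Set.ofList xs = ys := by
    have : PySem.Set.ofList xs = List.foldl PySem.Set.add [] xs := rfl
    rw [this, he]; rfl
  rw [this]; exact hs
theorem pvOfList_pairwise_lt (xs : List String) (h : xs.Pairwise (· ≤ ·)) :
    (PySem.Set.ofList xs).Pairwise (· < ·) := by
  have hle : (PySem.Set.ofList xs).Pairwise (· ≤ ·) := List.Pairwise.sublist (pvOfList_sublist xs) h
  have hnd : (PySem.Set.ofList xs).Nodup := PySem.Set.nodup_ofList xs
  exact (hle.and hnd).imp (fun ⟨h1, h2⟩ => lt_of_le_of_ne h1 h2)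
theorem pvB_fold_split (l : List (String × String)) :
    ∀ (d : PySem.Dict String (List String)) (pv : Option (String × String)),
    (l.foldl (fun (st : PySem.Dict String (List String) × Option (String × String)) pair =>
        if st.2 = some pair then st
        else (st.1.modify pair.1 [] (fun v => v ++ [pair.2]), some pair)) (d, pv)).1
      = (pvDst pv l).foldl (fun d p => d.modify p.1 [] (fun v => v ++ [p.2])) d := by
  induction l with
  | nil => intro d pv; rfl
  | cons p t ih =>
    intro d pv
    simp only [List.foldl_cons, pvDst]
    by_cases hp : pv = some p
    · rw [if_pos hp, if_pos hp]
      exact ih d pv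
    · rw [if_neg hp, if_neg hp]
      simp only [List.foldl_cons]
      exact ih _ _
theorem pvDst_spec (l : List (String × String)) :
    ∀ pv, l.Pairwise pvLexLe → (∀ z ∈ l, pvPvLe pv z) →
      (pvDst pv l).Pairwise pvLexLt ∧ (∀ x, x ∈ pvDst pv l ↔ (x ∈ l ∧ some x ≠ pv)) := by
  induction l with
  | nil => intro pv _ _; exact ⟨List.Pairwise.nil, by simp [pvDst]⟩
  | cons p t ih =>
    intro pv hpw hle
    rcases List.pairwise_cons.mp hpw with ⟨hp, ht⟩
    by_cases hpv : pv = some p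
    · rw [pvDst, if_pos hpv]
      obtain ⟨h1, h2⟩ := ih pv ht
        (fun z hz y hy => by rw [hpv] at hy; injection hy with h; rw [← h]; exact hp z hz)
      refine ⟨h1, fun x => (h2 x).trans ?_⟩
      constructor
      · rintro ⟨hx, hne⟩; exact ⟨List.mem_cons_of_mem _ hx, hne⟩
      · rintro ⟨hx, hne⟩
        rcases List.mem_cons.mp hx with rfl | hx
        · exact absurd hpv.symm hne
        · exact ⟨hx, hne⟩
    · rw [pvDst, if_neg hpv]
      obtain ⟨h1, h2⟩ := ih (some p) ht (fun z hz y hy => by cases hy; exact hp z hz)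
      constructor
      · refine List.pairwise_cons.mpr ⟨?_, h1⟩
        intro q hq
        obtain ⟨hqt, hqne⟩ := (h2 q).mp hq
        exact pvLexLt_of_le_ne (hp q hqt) (fun h => hqne (by rw [h]))
      · intro x
        constructor
        · intro hx
          rcases List.mem_cons.mp hx with rfl | hx
          · exact ⟨List.mem_cons_self .., fun h => hpv h.symm⟩
          · obtain ⟨hxt, hxne⟩ := (h2 x).mp hx
            refine ⟨List.mem_cons_of_mem _ hxt, ?_⟩
            intro hxpv
            rcases hpv' : pv with _ | y
            · rw [hpv'] at hxpv; cases hxpv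
            · rw [hpv'] at hxpv
              have hyx : y = x := by injection hxpv.symm
              have h1' : pvLexLe y p := hle p (List.mem_cons_self ..) y hpv'
              have h2' : pvLexLe p x := hp x hxt
              have : p = x := pvLexLe_antisymm h2' (hyx ▸ h1')
              exact hxne (by rw [this])
        · rintro ⟨hx, hne⟩
          rcases List.mem_cons.mp hx with rfl | hx
          · exact List.mem_cons_self ..
          · by_cases hxp : x = p
            · subst hxp; exact List.mem_cons_self ..
            · exact List.mem_cons_of_mem _ ((h2 x).mpr ⟨hx, fun h => hxp (by injection h)⟩)
theorem pvA_fold (entries : List (List (String × String))) :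
    (entries.foldl (fun blocked entry =>
      let node_id := pyGetStrD entry "node"
      let component_id := pyGetStrD entry "component"
      if node_id = "" ∨ component_id = "" then blocked
      else
        let d := blocked.setdefault node_id []
        let components := d.getD node_id []
        if component_id ∈ components then d
        else d.insert node_id (components ++ [component_id])) PySem.Dict.empty)
      = (pvPairs entries).foldl pvStepA PySem.Dict.empty := by
  unfold pvPairs
  rw [List.foldl_map]
  rw [← PySem.List.foldl_ite_eq_foldl_filter
    (p := fun e => pyGetStrD e "node" ≠ "" ∧ pyGetStrD e "component" ≠ "")
    (f := fun d e => pvStepA d (pyGetStrD e "node", pyGetStrD e "component"))]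
  apply PySem.List.foldl_congr_mem
  intro acc e _
  by_cases h : pyGetStrD e "node" = "" ∨ pyGetStrD e "component" = ""
  · rw [if_neg (show ¬(pyGetStrD e "node" ≠ "" ∧ pyGetStrD e "component" ≠ "") from
      fun hc => h.elim (fun hn => hc.1 hn) (fun hcv => hc.2 hcv)), if_pos h]
  · rw [if_pos (show pyGetStrD e "node" ≠ "" ∧ pyGetStrD e "component" ≠ "" from
      ⟨fun hn => h (Or.inl hn), fun hc => h (Or.inr hc)⟩), if_neg h]
    rfl
theorem pvB_pairs (entries : List (List (String × String))) :
    (entries.foldl (fun acc entry =>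
      let node_id := pyGetStrD entry "node"
      let component_id := pyGetStrD entry "component"
      if node_id ≠ "" ∧ component_id ≠ "" then acc ++ [(node_id, component_id)] else acc)
      ([] : List (String × String))) = pvPairs entries := by
  unfold pvPairs
  rw [show (List.map (fun e => (pyGetStrD e "node", pyGetStrD e "component"))
      (List.filter (fun e => decide (pyGetStrD e "node" ≠ "" ∧ pyGetStrD e "component" ≠ "")) entries))
    = [] ++ _ from (List.nil_append _).symm]
  rw [← PySem.List.foldl_append_ite
    (p := fun e => pyGetStrD e "node" ≠ "" ∧ pyGetStrD e "component" ≠ "")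
    (f := fun e => (pyGetStrD e "node", pyGetStrD e "component"))]
theorem pvStepA_getD (d : PySem.Dict String (List String)) (p : String × String) (n : String) :
    (pvStepA d p).getD n []
      = if p.1 = n then PySem.Set.add (d.getD n []) p.2 else d.getD n [] := by
  simp only [pvStepA]
  by_cases hn : p.1 = n
  · subst hn
    rw [if_pos rfl]
    by_cases hm : p.2 ∈ (d.setdefault p.1 []).getD p.1 []
    · rw [if_pos hm]
      have hm' : p.2 ∈ d.getD p.1 [] := by
        rwa [PySem.Dict.getD_setdefault_self] at hm
      rw [PySem.Dict.getD_setdefault_self, PySem.Set.add,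
        if_pos ((PySem.Set.contains_iff _ _).mpr hm')]
    · rw [if_neg hm]
      have hm' : p.2 ∉ d.getD p.1 [] := by
        rwa [PySem.Dict.getD_setdefault_self] at hm
      rw [PySem.Dict.getD_insert_self, PySem.Dict.getD_setdefault_self, PySem.Set.add,
        if_neg (fun hc => hm' ((PySem.Set.contains_iff _ _).mp hc))]
  · rw [if_neg hn]
    have hne : n ≠ p.1 := fun h => hn h.symm
    have hget : (d.setdefault p.1 []).getD n [] = d.getD n [] := by
      simp only [PySem.Dict.getD, PySem.Dict.get?_setdefault_of_ne d [] hne]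
    split
    · exact hget
    · rw [PySem.Dict.getD_insert_of_ne _ _ _ hne, hget]
theorem pvStepA_keys (d : PySem.Dict String (List String)) (p : String × String) :
    (pvStepA d p).keys = PySem.Set.add d.keys p.1 := by
  simp only [pvStepA]
  have hc : (d.setdefault p.1 []).contains p.1 = true := by
    rw [PySem.Dict.contains_setdefault]; simp
  have hk : (d.setdefault p.1 []).keys = PySem.Set.add d.keys p.1 := by
    rw [PySem.Dict.keys_setdefault, PySem.Set.add]
    by_cases hm : p.1 ∈ d.keys
    · rw [if_pos ((PySem.Dict.contains_iff_mem_keys _ _).mpr hm),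
        if_pos ((PySem.Set.contains_iff _ _).mpr hm)]
    · rw [if_neg (fun h => hm ((PySem.Dict.contains_iff_mem_keys _ _).mp h)),
        if_neg (fun h => hm ((PySem.Set.contains_iff _ _).mp h))]
  split
  · exact hk
  · rw [PySem.Dict.keys_insert_of_contains _ _ hc, hk]
theorem pvA_getD (P : List (String × String)) : ∀ (d : PySem.Dict String (List String)) (n : String),
    (P.foldl pvStepA d).getD n []
      = PySem.Set.update (d.getD n []) ((P.filter (fun p => p.1 == n)).map (fun p => p.2)) := by
  induction P with
  | nil => intro d n; rfl
  | cons p t ih =>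
    intro d n
    simp only [List.foldl_cons]
    rw [ih]
    by_cases hn : p.1 = n
    · rw [List.filter_cons_of_pos (by simpa using hn), List.map_cons]
      rw [pvStepA_getD, if_pos hn]
      rfl
    · rw [List.filter_cons_of_neg (by simpa using hn)]
      rw [pvStepA_getD, if_neg hn]
theorem pvA_keys (P : List (String × String)) : ∀ (d : PySem.Dict String (List String)),
    (P.foldl pvStepA d).keys = PySem.Set.update d.keys (P.map (fun p => p.1)) := by
  induction P with
  | nil => intro d; rfl
  | cons p t ih =>
    intro d
    simp only [List.foldl_cons, List.map_cons]
    rw [ih, pvStepA_keys]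
    rfl

theorem pvSorted2_items_eq (xs : List (String × List String))
    (hinj : ∀ a ∈ xs, ∀ b ∈ xs, a.1 = b.1 → a = b) :
    PySem.List.sorted2 xs (fun p => p.1) (fun p => p.2)
      = PySem.List.sorted xs (fun p => p.1) := by
  have h1 : PySem.List.sorted2 xs (fun p => p.1) (fun p => p.2)
      = xs.foldl (fun acc x => PySem.List.insertBy
          (fun a b => decide (a.1 < b.1) || (!decide (b.1 < a.1) && decide (a.2 < b.2))) x acc) [] := rfl
  rw [h1, PySem.List.sorted_eq_foldl_insertBy]
  apply pvFoldl_insertBy_congr (S := (· ∈ xs)) _ _ ?_ xs [] (fun x hx => hx) (by simp)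
  intro a b ha hb
  rcases lt_trichotomy a.1 b.1 with h | h | h
  · simp [h]
  · have hab : a = b := hinj a ha b hb h
    subst hab
    simp
  · rw [decide_eq_false (not_lt.mpr (le_of_lt h)), decide_eq_true h]
    simp

theorem pvA_eq_canon (entries : List (List (String × String))) :
    blocked_components_by_node_py entries = pvCanon (pvPairs entries) := by
  unfold blocked_components_by_node_py
  rw [pvA_fold]
  dsimp only
  have hkeys : ((pvPairs entries).foldl pvStepA PySem.Dict.empty).keys
      = PySem.Set.ofList ((pvPairs entries).map (fun p => p.1)) := by
    rw [pvA_keys]; rfl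
  have hnd : ((pvPairs entries).foldl pvStepA PySem.Dict.empty).keys.Nodup := by
    rw [hkeys]; exact PySem.Set.nodup_ofList _
  have hgetD : ∀ n, ((pvPairs entries).foldl pvStepA PySem.Dict.empty).getD n []
      = PySem.Set.ofList (((pvPairs entries).filter (fun p => p.1 == n)).map (fun p => p.2)) := by
    intro n; rw [pvA_getD]; rfl
  have hitems := PySem.Dict.items_eq_map_keys _ hnd []
  have hinj : ∀ a ∈ ((pvPairs entries).foldl pvStepA PySem.Dict.empty).items,
      ∀ b ∈ ((pvPairs entries).foldl pvStepA PySem.Dict.empty).items, a.1 = b.1 → a = b := by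
    have : (((pvPairs entries).foldl pvStepA PySem.Dict.empty).items.map (fun p => p.1)).Nodup := by
      rw [hitems, List.map_map]
      have : ((fun p => p.1) ∘ fun k => ((k : String),
          ((pvPairs entries).foldl pvStepA PySem.Dict.empty).getD k [])) = id := rfl
      rw [this, List.map_id]
      exact hnd
    exact fun a ha b hb => List.inj_on_of_nodup_map this ha hb
  rw [pvSorted2_items_eq _ hinj]
  have hsorted : PySem.List.sorted ((pvPairs entries).foldl pvStepA PySem.Dict.empty).items (fun p => p.1)
      = (PySem.List.sorted (PySem.Set.ofList ((pvPairs entries).map (fun p => p.1))) (fun n => n)).map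
          (fun k => (k, ((pvPairs entries).foldl pvStepA PySem.Dict.empty).getD k [])) := by
    apply PySem.List.sorted_eq_of_perm_of_pairwise_lt
    · refine List.Perm.trans (List.Perm.map _ ?_) (List.Perm.symm (by rw [hitems]))
      rw [hkeys]
      exact PySem.List.sorted_perm _ _ _
    · refine List.pairwise_map.mpr ?_
      exact PySem.List.sorted_ofList_pairwise_lt _
  rw [hsorted, List.map_map]
  unfold pvCanon
  simp only [Function.comp_def, hgetD]

theorem pvB_eq_canon (entries : List (List (String × String))) :
    blocked_components_by_node_py_alt entries = pvCanon (pvPairs entries) := by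
  unfold blocked_components_by_node_py_alt
  dsimp only
  rw [pvB_pairs, pvB_fold_split]
  obtain ⟨hpw, hmem⟩ := pvDst_spec
    (PySem.List.sorted2 (pvPairs entries) (fun p => p.1) (fun p => p.2)) none
    (pvSP_pairwise _) (fun z _ y hy => by cases hy)
  set L := pvDst none (PySem.List.sorted2 (pvPairs entries) (fun p => p.1) (fun p => p.2)) with hL
  have hLP : ∀ x, x ∈ L ↔ x ∈ pvPairs entries := by
    intro x
    rw [hmem x]
    simp only [ne_eq, reduceCtorEq, not_false_eq_true, and_true]
    exact (PySem.List.sorted2_perm (pvPairs entries) (fun p => p.1) (fun p => p.2) false).mem_iff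
  have hkeys : (L.foldl (fun d p => d.modify p.1 [] (fun v => v ++ [p.2])) PySem.Dict.empty).keys
      = PySem.Set.ofList (L.map (fun p => p.1)) := by
    rw [PySem.Dict.keys_foldl_modify_key L (fun p => p.1) [] (fun _ p v => v ++ [p.2])]; rfl
  have hnd : (L.foldl (fun d p => d.modify p.1 [] (fun v => v ++ [p.2])) PySem.Dict.empty).keys.Nodup := by
    rw [hkeys]; exact PySem.Set.nodup_ofList _
  have hgetD : ∀ n, (L.foldl (fun d p => d.modify p.1 [] (fun v => v ++ [p.2])) PySem.Dict.empty).getD n []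
      = (L.filter (fun p => p.1 == n)).map (fun p => p.2) := by
    intro n
    rw [PySem.Dict.getD_foldl_modify_append L PySem.Dict.empty n]
    rfl
  have hitems := PySem.Dict.items_eq_map_keys _ hnd []
  rw [hitems, hkeys]
  have hKN : PySem.Set.ofList (L.map (fun p => p.1))
      = PySem.List.sorted (PySem.Set.ofList ((pvPairs entries).map (fun p => p.1))) (fun n => n) := by
    symm
    apply PySem.List.sorted_eq_of_perm_of_pairwise_lt
    · refine (List.perm_ext_iff_of_nodup (PySem.Set.nodup_ofList _) (PySem.Set.nodup_ofList _)).mpr ?_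
      intro n
      rw [PySem.Set.mem_ofList, PySem.Set.mem_ofList]
      simp only [List.mem_map]
      exact ⟨fun ⟨p, hp, he⟩ => ⟨p, (hLP p).mp hp, he⟩, fun ⟨p, hp, he⟩ => ⟨p, (hLP p).mpr hp, he⟩⟩
    · apply pvOfList_pairwise_lt
      refine List.pairwise_map.mpr (hpw.imp ?_)
      intro a b hab
      rcases hab with h | ⟨h1, _⟩
      · exact le_of_lt h
      · exact le_of_eq h1
  have hcomps : ∀ n, (L.filter (fun p => p.1 == n)).map (fun p => p.2)
      = PySem.List.sorted
          (PySem.Set.ofList (((pvPairs entries).filter (fun p => p.1 == n)).map (fun p => p.2)))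
          (fun c => c) := by
    intro n
    symm
    apply PySem.List.sorted_eq_of_perm_of_pairwise_lt
    · have hpws : ((L.filter (fun p => p.1 == n)).map (fun p => p.2)).Pairwise (· < ·) := by
        refine List.pairwise_map.mpr ?_
        refine List.Pairwise.imp_of_mem ?_ (hpw.filter (fun p => p.1 == n))
        intro a b ha hb hab
        have han : a.1 = n := by simpa using (List.mem_filter.mp ha).2
        have hbn : b.1 = n := by simpa using (List.mem_filter.mp hb).2
        rcases hab with h | ⟨_, h2⟩
        · rw [han, hbn] at h; exact absurd h (lt_irrefl _)
        · exact h2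
      refine (List.perm_ext_iff_of_nodup ?_ (PySem.Set.nodup_ofList _)).mpr ?_
      · exact hpws.imp (fun h => ne_of_lt h)
      · intro c
        rw [PySem.Set.mem_ofList]
        simp only [List.mem_map, List.mem_filter, beq_iff_eq]
        constructor
        · rintro ⟨p, ⟨hp, hn⟩, hc⟩
          exact ⟨p, ⟨(hLP p).mp hp, hn⟩, hc⟩
        · rintro ⟨p, ⟨hp, hn⟩, hc⟩
          exact ⟨p, ⟨(hLP p).mpr hp, hn⟩, hc⟩
    · refine List.pairwise_map.mpr ?_
      refine List.Pairwise.imp_of_mem ?_ (hpw.filter (fun p => p.1 == n))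
      intro a b ha hb hab
      have han : a.1 = n := by simpa using (List.mem_filter.mp ha).2
      have hbn : b.1 = n := by simpa using (List.mem_filter.mp hb).2
      rcases hab with h | ⟨_, h2⟩
      · rw [han, hbn] at h; exact absurd h (lt_irrefl _)
      · exact h2
  rw [hKN]
  unfold pvCanon
  refine List.map_congr_left ?_
  intro n _
  rw [hgetD n, hcomps n]

-- ===== VERDICT (by name: the statement is the Claim_ definition above) =====
theorem blocked_components_by_node_py_spec : Claim_equal_blocked_components_by_node_py := by
  intro entries _
  unfold Spec_blocked_components_by_node_py
  rw [pvA_eq_canon, pvB_eq_canon]
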